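-- pv_equiv track=rewrite | github.com/DharaniGanesan1910/Offensive-Style-Analysis | backend/fine_grained/codeswitch_boundary.py | code_switch_boundaries
-- ===== SOURCE A (Python) =====
-- def code_switch_boundaries(tagged_sentence):
--     """
--     Input: "i/EN love/EN vijay/TA anna/TA u/EN r/EN so/EN cute/EN anna/TA"
--     Output: [0,0,1,0,1,0,0,0,1]
--     """
--     words = str(tagged_sentence).split()
--     boundaries = []
--     prev_lang = None
--     for w in words:
--         lang = w.split('/')[-1]
--         if prev_lang is None:
--             boundaries.append(0)  # first word has no boundary
--         else:
--             boundaries.append(1 if lang != prev_lang else 0)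
--         prev_lang = lang
--     return boundaries
-- ===== SOURCE B (Python) =====
-- def code_switch_boundaries(tagged_sentence):
--     # Run-length strategy: a two-pointer scan groups the per-token languages
--     # into maximal runs of equal language, then each run is emitted as a block
--     # (1 at the start of every run except the first, 0 elsewhere).
--     langs = [w.split('/')[-1] for w in str(tagged_sentence).split()]
--     runs = []
--     i = 0
--     while i < len(langs):
--         j = i + 1
--         while j < len(langs) and langs[j] == langs[i]:
--             j += 1
--         runs.append(j - i)
--         i = j
--     out = []
--     for k, n in enumerate(runs):
--         out += ([0] if k == 0 else [1]) + [0] * (n - 1)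
--     return out
-- ===== Notes on version B (the rewrite author's own statement) =====
-- stated objective: alternative
-- what changed: B run-length encodes the per-token language sequence with a two-pointer scan (inner loop finds the end of each maximal run of equal language) and then emits each run as a block [1,0,...,0] (first run [0,0,...,0]), instead of A's single fused loop threading prev_lang and appending one flag per word.
import Mathlib
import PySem

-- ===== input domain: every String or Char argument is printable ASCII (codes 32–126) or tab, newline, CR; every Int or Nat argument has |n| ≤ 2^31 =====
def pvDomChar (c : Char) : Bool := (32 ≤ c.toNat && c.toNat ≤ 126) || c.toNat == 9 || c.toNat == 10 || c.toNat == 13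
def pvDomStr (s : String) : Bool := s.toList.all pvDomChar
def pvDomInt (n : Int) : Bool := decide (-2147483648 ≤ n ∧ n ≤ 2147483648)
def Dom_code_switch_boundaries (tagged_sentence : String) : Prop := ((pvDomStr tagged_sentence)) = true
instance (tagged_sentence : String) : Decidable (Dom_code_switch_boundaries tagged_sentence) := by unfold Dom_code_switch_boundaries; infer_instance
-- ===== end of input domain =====

-- B run-length encodes the language sequence with a two-pointer scan and emits boundary flags run by run, instead of A's fused prev_lang loop; objective: alternative.

-- ===== PORT A =====
-- w.split('/')[-1]: sep "/" is non-empty so split? is always some and never empty, so [-1] never raises; the getD defaults are unreachable and exact.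
def csbLang (w : String) : String :=
  PySem.List.pyGetD ((PySem.Str.split? w "/").getD []) (-1) ""

def code_switch_boundaries (tagged_sentence : String) : List Int :=
  let words := PySem.Str.split₀ tagged_sentence
  (words.foldl (fun (st : List Int × Option String) w =>
      let lang := csbLang w
      match st.2 with
      | none => (st.1 ++ [0], some lang)
      | some p => (st.1 ++ [if lang ≠ p then 1 else 0], some lang))
    ([], none)).1

-- ===== PORT B =====
-- inner while of Source B: advance j while j < len(langs) and langs[j] == langs[i] (v = langs[i])
def csbRunEnd (langs : List String) (v : String) (j : Nat) : Nat :=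
  if h : j < langs.length ∧ PySem.List.pyGetD langs (j : Int) "" = v then
    csbRunEnd langs v (j + 1)
  else j
termination_by langs.length - j
decreasing_by omega

-- termination fact the outer loop's recursion cites: j never moves left
theorem csbRunEnd_ge (langs : List String) (v : String) (j : Nat) :
    j ≤ csbRunEnd langs v j := by
  fun_induction csbRunEnd with
  | case1 j h ih => omega
  | case2 j h => omega

-- outer while of Source B: collect the run lengths j - i
def csbRunsLoop (langs : List String) (i : Nat) (runs : List Int) : List Int :=
  if h : i < langs.length then
    let j := csbRunEnd langs (PySem.List.pyGetD langs (i : Int) "") (i + 1)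
    csbRunsLoop langs j (runs ++ [(j : Int) - (i : Int)])
  else runs
termination_by langs.length - i
decreasing_by
  have := csbRunEnd_ge langs (PySem.List.pyGetD langs (i : Int) "") (i + 1)
  omega

def code_switch_boundaries_alt (tagged_sentence : String) : List Int :=
  let langs := (PySem.Str.split₀ tagged_sentence).map csbLang
  let runs := csbRunsLoop langs 0 []
  (PySem.List.enumerate runs 0).foldl
    (fun out kn =>
      out ++ ((if kn.1 = 0 then [0] else [1]) ++ List.replicate (kn.2 - 1).toNat 0)) []

-- ===== PRECONDITION & SPEC =====
def Spec_code_switch_boundaries (tagged_sentence : String) (out : List Int) : Prop := out = code_switch_boundaries_alt tagged_sentence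
instance (tagged_sentence : String) (out : List Int) : Decidable (Spec_code_switch_boundaries tagged_sentence out) := by unfold Spec_code_switch_boundaries; infer_instance

-- ===== CLAIM (what is proved, stated in full; the proofs are below) =====
def Claim_equal_code_switch_boundaries : Prop := ∀ (tagged_sentence : String), Dom_code_switch_boundaries tagged_sentence → Spec_code_switch_boundaries tagged_sentence (code_switch_boundaries tagged_sentence)

-- ===== LEMMAS AND PROOFS =====

-- adjacency flags of a language list with head p: A's loop body after the first word
def csbAdj : String → List String → List Int
  | _, [] => []
  | x, y :: t => (if y ≠ x then 1 else 0) :: csbAdj y t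

def csbStep (st : List Int × Option String) (lang : String) : List Int × Option String :=
  match st.2 with
  | none => (st.1 ++ [0], some lang)
  | some p => (st.1 ++ [if lang ≠ p then 1 else 0], some lang)

theorem csb_loop (rest : List String) (acc : List Int) (p : String) :
    (List.foldl csbStep (acc, some p) rest).1 = acc ++ csbAdj p rest := by
  induction rest generalizing acc p with
  | nil => simp [csbAdj]
  | cons r rs ih => simp [csbStep, csbAdj, ih]

-- reference run-length encoding, by structural recursion
def csbRuns : List String → List Int
  | [] => []
  | x :: rest =>
    match csbRuns rest, rest with
    | n :: rs, y :: _ => if y = x then (n + 1) :: rs else 1 :: n :: rs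
    | _, _ => [1]

theorem csbRuns_pos (xs : List String) : ∀ n ∈ csbRuns xs, 1 ≤ n := by
  induction xs with
  | nil => simp [csbRuns]
  | cons x rest ih =>
    simp only [csbRuns]
    cases h : csbRuns rest with
    | nil => simp
    | cons n rs =>
      cases rest with
      | nil => simp
      | cons y t =>
        have hn : 1 ≤ n := ih n (by simp [h])
        have hrs : ∀ m ∈ rs, 1 ≤ m := fun m hm => ih m (by simp [h, hm])
        by_cases hy : y = x <;> intro m hm <;> simp [hy] at hm
        · rcases hm with hm | hm
          · omega
          · exact hrs m hm
        · rcases hm with hm | hm | hm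
          · omega
          · omega
          · exact hrs m hm

theorem csbRuns_ne_nil (x : String) (t : List String) : csbRuns (x :: t) ≠ [] := by
  simp only [csbRuns]
  cases h : csbRuns t <;> cases t <;> (try split) <;> (try split) <;> simp_all

theorem csbRuns_cons_cons (x y : String) (t : List String) (n : Int) (rs : List Int)
    (h : csbRuns (y :: t) = n :: rs) :
    csbRuns (x :: y :: t) = if y = x then (n + 1) :: rs else 1 :: n :: rs := by
  show (match csbRuns (y :: t), (y :: t) with
        | n :: rs, z :: _ => if z = x then (n + 1) :: rs else 1 :: n :: rs
        | _, _ => [1]) = _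
  rw [h]

-- the head of the reference RLE counts the leading run
theorem csbRuns_head (t : List String) (x : String) :
    csbRuns (x :: t)
      = (1 + ((t.takeWhile (fun y => y = x)).length : Int))
          :: csbRuns (t.dropWhile (fun y => y = x)) := by
  induction t generalizing x with
  | nil => simp [csbRuns]
  | cons y t' ih =>
    have hy' := ih y
    rw [csbRuns_cons_cons x y t' _ _ hy']
    by_cases hyx : y = x
    · rw [if_pos hyx]
      subst hyx
      simp [List.takeWhile_cons, List.dropWhile_cons]
      omega
    · rw [if_neg hyx]
      simp [List.takeWhile_cons, List.dropWhile_cons, hyx, hy']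

-- dropWhile drops exactly the takeWhile prefix
theorem csb_dropWhile_eq_drop (p : String → Bool) (l : List String) :
    l.dropWhile p = l.drop (l.takeWhile p).length := by
  induction l with
  | nil => rfl
  | cons a l ih =>
    by_cases h : p a
    · simp [List.dropWhile_cons, List.takeWhile_cons, h, ih]
    · simp [List.dropWhile_cons, List.takeWhile_cons, h]

-- the inner while returns start + length of the run of v beginning at j
theorem csbRunEnd_eq (langs : List String) (v : String) (j : Nat) :
    csbRunEnd langs v j = j + ((langs.drop j).takeWhile (fun y => y = v)).length := by
  fun_induction csbRunEnd with
  | case1 j h ih =>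
    obtain ⟨hj, hv⟩ := h
    have hget : PySem.List.pyGetD langs (j : Int) "" = langs[j] :=
      by simp [hj]
    have hdrop : langs.drop j = langs[j] :: langs.drop (j + 1) :=
      (List.getElem_cons_drop hj).symm
    rw [ih, hdrop, List.takeWhile_cons]
    rw [hget] at hv
    simp [hv]
    omega
  | case2 j h =>
    rcases Nat.lt_or_ge j langs.length with hj | hj
    · have hget : PySem.List.pyGetD langs (j : Int) "" = langs[j] :=
        by simp [hj]
      have hv : ¬ langs[j] = v := by
        intro hc; exact h ⟨hj, by rw [hget, hc]⟩
      have hdrop : langs.drop j = langs[j] :: langs.drop (j + 1) :=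
        (List.getElem_cons_drop hj).symm
      rw [hdrop, List.takeWhile_cons]
      simp [hv]
    · rw [List.drop_eq_nil_of_le hj]
      simp

-- the outer while computes the reference RLE of the remaining suffix
theorem csbRunsLoop_eq (langs : List String) (i : Nat) (acc : List Int) :
    csbRunsLoop langs i acc = acc ++ csbRuns (langs.drop i) := by
  fun_induction csbRunsLoop with
  | case1 i acc h j ih =>
    have hget : PySem.List.pyGetD langs (i : Int) "" = langs[i] :=
      by simp [h]
    have hdrop : langs.drop i = langs[i] :: langs.drop (i + 1) :=
      (List.getElem_cons_drop h).symm
    have hj : j = (i + 1) + ((langs.drop (i + 1)).takeWhile (fun y => y = langs[i])).length := by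
      show csbRunEnd langs (PySem.List.pyGetD langs (i : Int) "") (i + 1) = _
      rw [hget]
      exact csbRunEnd_eq langs langs[i] (i + 1)
    have hdropj : langs.drop j
        = (langs.drop (i + 1)).dropWhile (fun y => y = langs[i]) := by
      rw [csb_dropWhile_eq_drop, List.drop_drop, hj]
    rw [ih, hdropj, hdrop, csbRuns_head, List.append_assoc]
    have hlen : ((j : Int) - (i : Int))
        = 1 + (((langs.drop (i + 1)).takeWhile (fun y => y = langs[i])).length : Int) := by
      rw [hj]; push_cast; ring
    rw [hlen]
    rfl
  | case2 i acc h =>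
    rw [List.drop_eq_nil_of_le (by omega)]
    simp [csbRuns]

theorem csb_emit_loop (rs : List Int) (acc : List Int) :
    rs.foldl (fun acc m => acc ++ (1 :: List.replicate (m - 1).toNat 0)) acc
      = acc ++ rs.flatMap (fun m => 1 :: List.replicate (m - 1).toNat 0) := by
  induction rs generalizing acc with
  | nil => simp
  | cons m ms ih => rw [List.foldl_cons, ih, List.flatMap_cons, List.append_assoc]

-- the enumerate-based emission of Source B equals the flag-per-run fold (positive start index → always the [1] branch)
theorem csb_enum_emit (rs : List Int) (s : Int) (hs : 1 ≤ s) (acc : List Int) :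
    (PySem.List.enumerate rs s).foldl
        (fun out kn =>
          out ++ ((if kn.1 = 0 then [0] else [1]) ++ List.replicate (kn.2 - 1).toNat 0)) acc
      = rs.foldl (fun acc m => acc ++ (1 :: List.replicate (m - 1).toNat 0)) acc := by
  induction rs generalizing s acc with
  | nil => simp [PySem.List.enumerate_nil]
  | cons m ms ih =>
    rw [PySem.List.enumerate_cons, List.foldl_cons, List.foldl_cons]
    rw [if_neg (by omega)]
    rw [ih (s + 1) (by omega)]
    rfl

-- run-length emission equals the adjacency flags, for a nonempty language list
theorem csb_runs_emit (t : List String) (x : String) :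
    (match csbRuns (x :: t) with
     | [] => ([] : List Int)
     | n :: rs => 0 :: (List.replicate (n - 1).toNat 0
          ++ rs.flatMap (fun m => 1 :: List.replicate (m - 1).toNat 0)))
      = 0 :: csbAdj x t := by
  induction t generalizing x with
  | nil => simp [csbRuns, csbAdj]
  | cons y t' ih =>
    have hih := ih y
    cases hr : csbRuns (y :: t') with
    | nil => exact absurd hr (csbRuns_ne_nil y t')
    | cons n rs =>
      have hn : 1 ≤ n := csbRuns_pos (y :: t') n (by simp [hr])
      rw [hr] at hih
      simp only at hih
      have htail : List.replicate (n - 1).toNat 0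
            ++ rs.flatMap (fun m => 1 :: List.replicate (m - 1).toNat 0) = csbAdj y t' := by
        exact List.cons_injective hih
      show (match csbRuns (x :: y :: t') with
            | [] => ([] : List Int)
            | n :: rs => 0 :: (List.replicate (n - 1).toNat 0
                ++ rs.flatMap (fun m => 1 :: List.replicate (m - 1).toNat 0)))
          = 0 :: csbAdj x (y :: t')
      have hruns : csbRuns (x :: y :: t')
          = if y = x then (n + 1) :: rs else 1 :: n :: rs := by
        simp only [csbRuns] at hr ⊢
        rw [hr]
      by_cases hy : y = x
      · rw [hruns, if_pos hy]
        simp only [csbAdj]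
        rw [if_neg (not_not_intro hy)]
        have hcnt : ((n + 1) - 1).toNat = (n - 1).toNat + 1 := by omega
        rw [hcnt, List.replicate_succ, List.cons_append, htail]
      · rw [hruns, if_neg hy]
        simp only [csbAdj]
        rw [if_pos hy]
        have h0 : ((1 : Int) - 1).toNat = 0 := rfl
        rw [List.flatMap_cons, h0, List.replicate_zero, List.nil_append,
          List.cons_append, htail]

theorem code_switch_boundaries_spec : Claim_equal_code_switch_boundaries := by
  intro s _
  unfold Spec_code_switch_boundaries code_switch_boundaries code_switch_boundaries_alt
  have hfold : ∀ (ws : List String) (st : List Int × Option String),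
      ws.foldl (fun (st : List Int × Option String) w =>
        let lang := csbLang w
        match st.2 with
        | none => (st.1 ++ [0], some lang)
        | some p => (st.1 ++ [if lang ≠ p then 1 else 0], some lang)) st
      = (ws.map csbLang).foldl csbStep st := by
    intro ws st
    rw [List.foldl_map]
    rfl
  simp only [hfold, csbRunsLoop_eq, List.drop_zero, List.nil_append]
  cases h : (PySem.Str.split₀ s).map csbLang with
  | nil => rfl
  | cons l0 rest =>
    simp only [List.foldl_cons, csbStep, List.nil_append]
    rw [csb_loop]
    have hemit := csb_runs_emit rest l0
    cases hr : csbRuns (l0 :: rest) with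
    | nil => exact absurd hr (csbRuns_ne_nil l0 rest)
    | cons n rs =>
      rw [hr] at hemit
      simp only at hemit
      show [0] ++ csbAdj l0 rest
          = (PySem.List.enumerate (n :: rs) 0).foldl
              (fun out kn =>
                out ++ ((if kn.1 = 0 then [0] else [1]) ++ List.replicate (kn.2 - 1).toNat 0)) []
      rw [PySem.List.enumerate_cons, List.foldl_cons,
        csb_enum_emit rs (0 + 1) (by omega), csb_emit_loop]
      show [0] ++ csbAdj l0 rest
          = ([] ++ ([0] ++ List.replicate (n - 1).toNat 0))
              ++ rs.flatMap (fun m => 1 :: List.replicate (m - 1).toNat 0)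
      simp only [List.nil_append, List.singleton_append, List.cons_append, List.append_assoc]
      exact hemit.symm
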